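-- pv_equiv track=rewrite | github.com/simonyang0608/LeetCode | Array/2289.Steps_to_Make_Array_Non-decreasing/Python/2289.Steps_to_Make_Array_Non-decreasing.py | totalSteps
-- ===== SOURCE A (Python) =====
-- def totalSteps(nums):
--     """
--     :type nums: List[int]
--     :rtype: int
--     """
--     #==============================#
--     # Stack-based traversal method #
--     #==============================#
--
--     ############
--     #Initialize
--     ##### Length of nums array #####
--     len_nums = len(nums)
--
--     ##### Record stack #####
--     record_stack = []
--
--     ##### Result maximun summary counter #####
--     res_max_cnter = 0
--
--
--     ############################
--     #Stack-based loop traversal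
--     for nums_idx in range((len_nums - 1), (-1), (-1)):
--         record_cnter = 0 #Record summary counter
--
--         while (record_stack and ((record_stack[(-1)])[0] < nums[nums_idx])):
--             record_cnter = max((record_cnter + 1), (record_stack[(-1)])[1]) #Keep updating/overwriting
--
--             record_stack.pop() #Keep updating/popped
--
--         res_max_cnter = max(res_max_cnter, record_cnter) #Keep updating/overwriting
--
--         record_stack.append([nums[nums_idx], record_cnter]) #Keep updating/recording
--
--     return res_max_cnter
-- ===== SOURCE B (Python) =====
-- def totalSteps(nums):
--     """
--     :type nums: List[int]
--     :rtype: int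
--     """
--     # Round-by-round simulation: repeatedly delete, simultaneously, every
--     # element strictly smaller than its left neighbour; count the rounds.
--     arr = list(nums)
--     steps = 0
--     while True:
--         kept = arr[:1] + [cur for prev, cur in zip(arr, arr[1:]) if prev <= cur]
--         if len(kept) == len(arr):
--             return steps
--         arr = kept
--         steps += 1
-- ===== Notes on version B (the rewrite author's own statement) =====
-- stated objective: alternative
-- what changed: Replaced the right-to-left monotonic-stack DP that aggregates per-element eating counters with a direct round-by-round simulation that simultaneously deletes every element smaller than its left neighbour and counts the rounds.
import Mathlib
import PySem

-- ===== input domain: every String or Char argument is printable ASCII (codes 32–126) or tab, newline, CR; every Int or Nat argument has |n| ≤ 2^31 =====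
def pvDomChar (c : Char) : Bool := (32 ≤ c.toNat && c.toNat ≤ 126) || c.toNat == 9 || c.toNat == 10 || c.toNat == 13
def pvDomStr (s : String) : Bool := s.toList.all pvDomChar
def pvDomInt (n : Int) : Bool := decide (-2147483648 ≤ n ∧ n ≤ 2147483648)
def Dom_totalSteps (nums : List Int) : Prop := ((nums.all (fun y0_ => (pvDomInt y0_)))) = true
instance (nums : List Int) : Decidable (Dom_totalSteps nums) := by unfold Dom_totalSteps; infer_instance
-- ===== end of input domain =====

-- B replaces A's right-to-left monotonic-stack DP by a direct round-by-round removal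
-- simulation (objective: alternative algorithm for the same task, not faster).

-- ===== PORT A =====
-- the inner `while` loop of A: pops stack entries whose value is < v, merging counters
def popA (v : Int) : List (Int × Int) → Int → (List (Int × Int)) × Int
  | [], c => ([], c)
  | (w, d) :: t, c => if w < v then popA v t (max (c + 1) d) else ((w, d) :: t, c)

def totalSteps (nums : List Int) : Int :=
  let lenNums : Int := (nums.length : Int)
  ((PySem.List.pyRange (lenNums - 1) (-1) (-1)).foldl
    (fun (st : List (Int × Int) × Int) idx =>
      -- nums[nums_idx]: the index is always in range here, so the default is never used
      let v := PySem.List.pyGetD nums idx 0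
      let pr := popA v st.1 0
      ((v, pr.2) :: pr.1, max st.2 pr.2))
    ([], 0)).2

-- ===== PORT B =====
-- one simultaneous removal round: keep arr[0] and every element ≥ its left neighbour
def roundB (arr : List Int) : List Int :=
  arr.take 1 ++ (((arr.zip arr.tail).filter (fun pc => pc.1 ≤ pc.2)).map (·.2))

-- termination helper for the simulation loop (cited in decreasing_by)
theorem roundB_length_le (arr : List Int) : (roundB arr).length ≤ arr.length := by
  cases arr with
  | nil => simp [roundB]
  | cons x rest =>
      have h1 := List.length_filter_le (fun pc : Int × Int => decide (pc.1 ≤ pc.2))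
        ((x :: rest).zip rest)
      simp [roundB] at *
      omega

def simB (arr : List Int) (steps : Int) : Int :=
  if (roundB arr).length = arr.length then steps
  else simB (roundB arr) (steps + 1)
termination_by arr.length
decreasing_by
  have h1 := roundB_length_le arr
  omega

def totalSteps_alt (nums : List Int) : Int := simB nums 0

-- ===== PRECONDITION & SPEC =====
def Spec_totalSteps (nums : List Int) (out : Int) : Prop := out = totalSteps_alt nums
instance (nums : List Int) (out : Int) : Decidable (Spec_totalSteps nums out) := by unfold Spec_totalSteps; infer_instance

-- ===== CLAIM (what is proved, stated in full; the proofs are below) =====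
def Claim_equal_totalSteps : Prop := ∀ (nums : List Int), Dom_totalSteps nums → Spec_totalSteps nums (totalSteps nums)

-- ===== LEMMAS AND PROOFS =====

-- A's per-element step, and A's loop as a foldr over the list (right-to-left traversal)
def stepA (v : Int) (st : List (Int × Int) × Int) : List (Int × Int) × Int :=
  ((v, (popA v st.1 0).2) :: (popA v st.1 0).1, max st.2 (popA v st.1 0).2)

def gA (l : List Int) : List (Int × Int) × Int := l.foldr stepA ([], 0)

theorem stepA_fst (v : Int) (st : List (Int × Int) × Int) :
    (stepA v st).1 = (v, (popA v st.1 0).2) :: (popA v st.1 0).1 := rfl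

-- counter-merge fold (what popA's counter accumulation computes)
def fm (c : Int) (ds : List Int) : Int := ds.foldl (fun c d => max (c + 1) d) c

def pLT (v : Int) : Int × Int → Bool := fun e => decide (e.1 < v)

theorem popA_eq (v : Int) : ∀ (s : List (Int × Int)) (c : Int),
    popA v s c = (s.dropWhile (pLT v), fm c ((s.takeWhile (pLT v)).map (·.2))) := by
  intro s
  induction s with
  | nil => intro c; simp [popA, fm]
  | cons e t ih =>
      intro c
      obtain ⟨w, d⟩ := e
      by_cases h : w < v
      · simp [popA, h, pLT, ih, fm]
      · simp [popA, h, pLT, fm]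

theorem fm_ge_start : ∀ (ds : List Int) (c : Int), c ≤ fm c ds := by
  intro ds
  induction ds with
  | nil => intro c; simp [fm]
  | cons d t ih =>
      intro c
      have h2 := ih (max (c + 1) d)
      simp [fm] at *
      omega

theorem fm_ge_mem : ∀ (ds : List Int) (c : Int) (d : Int), d ∈ ds → d ≤ fm c ds := by
  intro ds
  induction ds with
  | nil => intro c d h; simp at h
  | cons e t ih =>
      intro c d h
      rcases List.mem_cons.mp h with h | h
      · subst h
        have := fm_ge_start t (max (c + 1) d)
        simp [fm] at *
        omega
      · have := ih (max (c + 1) e) d h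
        simp [fm] at *
        omega

theorem fm_append (c : Int) (a b : List Int) : fm c (a ++ b) = fm (fm c a) b := by
  simp [fm, List.foldl_append]

-- the result component of A's state equals the largest counter on its stack
def smax (s : List (Int × Int)) : Int := s.foldr (fun e m => max e.2 m) 0

theorem smax_nonneg : ∀ s, 0 ≤ smax s := by
  intro s
  induction s with
  | nil => simp [smax]
  | cons e t ih => simp [smax] at *; omega

theorem smax_append : ∀ a b, smax (a ++ b) = max (smax a) (smax b) := by
  intro a b
  induction a with
  | nil => have := smax_nonneg b; simp [smax] at *; omega
  | cons e t ih => simp [smax] at *; omega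

theorem smax_le : ∀ s (m : Int), (∀ e ∈ s, e.2 ≤ m) → 0 ≤ m → smax s ≤ m := by
  intro s
  induction s with
  | nil => intro m _ h0; simpa [smax] using h0
  | cons e t ih =>
      intro m h h0
      have h1 := h e (by simp)
      have h2 := ih m (fun x hx => h x (by simp [hx])) h0
      simp [smax] at *
      omega

theorem res_eq_smax (l : List Int) : (gA l).2 = smax (gA l).1 := by
  induction l with
  | nil => simp [gA, smax]
  | cons v t ih =>
      show (stepA v (gA t)).2 = smax (stepA v (gA t)).1
      unfold stepA
      rw [popA_eq]
      set s := (gA t).1 with hs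
      set c := fm 0 ((s.takeWhile (pLT v)).map (·.2)) with hc
      have hsplit : smax s = max (smax (s.takeWhile (pLT v))) (smax (s.dropWhile (pLT v))) := by
        conv_lhs => rw [← List.takeWhile_append_dropWhile (p := pLT v) (l := s)]
        exact smax_append _ _
      have htw : smax (s.takeWhile (pLT v)) ≤ c := by
        apply smax_le
        · intro e he
          exact fm_ge_mem _ 0 e.2 (List.mem_map.mpr ⟨e, he, rfl⟩)
        · exact fm_ge_start _ 0
      have h0 : (0:Int) ≤ c := fm_ge_start _ 0
      simp only [smax, List.foldr_cons] at *
      omega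

-- B's round in structural form
def keepAux : Int → List Int → List Int
  | _, [] => []
  | p, y :: t => (if p > y then [] else [y]) ++ keepAux y t

def roundK : List Int → List Int
  | [] => []
  | x :: rest => x :: keepAux x rest

theorem zipfilter : ∀ (l : List Int) (p : Int),
    (((p :: l).zip l).filter (fun pc => decide (pc.1 ≤ pc.2))).map (·.2) = keepAux p l := by
  intro l
  induction l with
  | nil => intro p; simp [keepAux]
  | cons y t ih =>
      intro p
      by_cases h : p > y
      · simp [keepAux, h, show ¬ (p ≤ y) by omega, ih]
      · simp [keepAux, h, show p ≤ y by omega, ih]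

theorem roundB_eq_roundK (arr : List Int) : roundB arr = roundK arr := by
  cases arr with
  | nil => simp [roundB, roundK]
  | cons x rest => simp [roundB, roundK, zipfilter]

-- decrement every counter on the stack (floored at 0)
def decS (s : List (Int × Int)) : List (Int × Int) :=
  s.map (fun e => (e.1, max (e.2 - 1) 0))

theorem takeWhile_decS (p : Int) : ∀ s, (decS s).takeWhile (pLT p) = decS (s.takeWhile (pLT p)) := by
  intro s
  induction s with
  | nil => simp [decS]
  | cons a t ih =>
      by_cases h : a.1 < p
      · simp [decS, pLT, h] at *
        exact ih
      · simp [decS, pLT, h]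

theorem dropWhile_decS (p : Int) : ∀ s, (decS s).dropWhile (pLT p) = decS (s.dropWhile (pLT p)) := by
  intro s
  induction s with
  | nil => simp [decS]
  | cons a t ih =>
      by_cases h : a.1 < p
      · simp [decS, pLT, h] at *
        exact ih
      · simp [decS, pLT, h]

theorem takeWhile_trans (q r : Int × Int → Bool) : ∀ (l : List (Int × Int)),
    (∀ e ∈ l.takeWhile q, r e = true) →
    l.takeWhile r = l.takeWhile q ++ (l.dropWhile q).takeWhile r := by
  intro l
  induction l with
  | nil => simp
  | cons a t ih =>
      intro h
      by_cases hq : q a = true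
      · have hr : r a = true := h a (by simp [hq])
        rw [List.takeWhile_cons_of_pos hq, List.dropWhile_cons_of_pos hq,
          List.takeWhile_cons_of_pos hr, List.cons_append]
        congr 1
        exact ih (fun e he => h e (by simp [hq, he]))
      · rw [show (a::t).takeWhile q = [] from List.takeWhile_cons_of_neg (by simp [hq]),
          show (a::t).dropWhile q = a::t from List.dropWhile_cons_of_neg (by simp [hq]),
          List.nil_append]

theorem dropWhile_trans (q r : Int × Int → Bool) : ∀ (l : List (Int × Int)),
    (∀ e ∈ l.takeWhile q, r e = true) →
    l.dropWhile r = (l.dropWhile q).dropWhile r := by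
  intro l
  induction l with
  | nil => simp
  | cons a t ih =>
      intro h
      by_cases hq : q a = true
      · have hr : r a = true := h a (by simp [hq])
        rw [List.dropWhile_cons_of_pos hr, List.dropWhile_cons_of_pos hq]
        exact ih (fun e he => h e (by simp [hq, he]))
      · rw [show (a::t).dropWhile q = a::t from List.dropWhile_cons_of_neg (by simp [hq])]

theorem smax_decS (s : List (Int × Int)) : smax (decS s) = max (smax s - 1) 0 := by
  induction s with
  | nil => simp [smax, decS]
  | cons e t ih => simp [smax, decS] at *; omega

-- counter fold over decremented counters = decremented counter fold
theorem fold_dec : ∀ (ds : List Int) (c : Int),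
    fm (max (c - 1) 0) (ds.map (fun d => max (d - 1) 0)) = max (fm (max 1 c) ds - 1) 0 := by
  intro ds
  induction ds with
  | nil => intro c; simp [fm]; omega
  | cons d t ih =>
      intro c
      have h1 : max (max (c-1) 0 + 1) (max (d-1) 0) = max (max (max 1 c + 1) d - 1) 0 := by omega
      have h2 : max 1 (max (max 1 c + 1) d) = max (max 1 c + 1) d := by omega
      have h3 := ih (max (max 1 c + 1) d)
      rw [h2] at h3
      simp only [fm, List.map_cons, List.foldl_cons] at *
      rw [h1, h3]

-- KEY: one removal round decrements every counter on A's stack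
theorem key : ∀ (l : List Int) (p : Int),
    (stepA p (gA (keepAux p l))).1 = decS ((stepA p (gA l)).1) := by
  intro l
  induction l with
  | nil => intro p; simp [keepAux, gA, stepA, popA, decS]
  | cons y t ih =>
      intro p
      by_cases h : p > y
      · -- y is removed by the round: keepAux p (y::t) = keepAux y t
        have e1 : keepAux p (y :: t) = keepAux y t := by simp [keepAux, h]
        rw [e1, show gA (y :: t) = stepA y (gA t) from rfl]
        set w := (gA (keepAux y t)).1 with hw
        set sg := (gA t).1 with hsg
        set sdw := sg.dropWhile (pLT y) with hsdw
        set cV := fm 0 ((sg.takeWhile (pLT y)).map (·.2)) with hcV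
        set ds := ((sdw.takeWhile (pLT p)).map (·.2)) with hds
        have hIH := ih y
        rw [stepA_fst, stepA_fst, popA_eq, popA_eq] at hIH
        simp only [decS, List.map_cons] at hIH
        have hpair := (List.cons.injEq _ _ _ _).mp hIH
        have hcW : fm 0 ((w.takeWhile (pLT y)).map (·.2)) = max (cV - 1) 0 :=
          congrArg Prod.snd hpair.1
        have hdw : w.dropWhile (pLT y) = decS sdw := hpair.2
        have hall : ∀ e ∈ w.takeWhile (pLT y), pLT p e = true := by
          intro e he
          have h1 : pLT y e = true := List.mem_takeWhile_imp he
          simp [pLT] at *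
          omega
        -- inner state on the RHS
        have hinner : (stepA y (gA t)).1 = (y, cV) :: sdw := by
          rw [stepA_fst, popA_eq]
        -- LHS normalisation
        rw [stepA_fst, popA_eq,
          takeWhile_trans (pLT y) (pLT p) w hall, dropWhile_trans (pLT y) (pLT p) w hall,
          List.map_append, fm_append, hcW, hdw, takeWhile_decS, dropWhile_decS]
        -- RHS normalisation
        rw [stepA_fst p, hinner,
          show popA p ((y, cV) :: sdw) 0 = popA p sdw (max (0 + 1) cV) from by
            simp [popA, show y < p from h],
          show max (0 + 1) cV = max 1 cV from by norm_num,
          popA_eq]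
        simp only [decS, List.map_cons, List.map_map]
        congr 1
        have hm : (sdw.takeWhile (pLT p)).map
            ((·.2) ∘ (fun e : Int × Int => (e.1, max (e.2 - 1) 0)))
            = ds.map (fun d => max (d - 1) 0) := by
          simp [hds, List.map_map, Function.comp]
        rw [hm, fold_dec]
      · -- y is kept by the round
        have e1 : keepAux p (y :: t) = y :: keepAux y t := by simp [keepAux, h]
        rw [e1, show gA (y :: keepAux y t) = stepA y (gA (keepAux y t)) from rfl,
          show gA (y :: t) = stepA y (gA t) from rfl]
        obtain ⟨cW, w2, h1⟩ : ∃ c s', (stepA y (gA (keepAux y t))).1 = (y, c) :: s' := ⟨_, _, rfl⟩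
        obtain ⟨cV, v2, h2⟩ : ∃ c s', (stepA y (gA t)).1 = (y, c) :: s' := ⟨_, _, rfl⟩
        rw [stepA_fst p, stepA_fst p, h1, h2]
        have hnp : ¬ (y < p) := by omega
        have h3 := ih y
        rw [h1, h2] at h3
        simp only [popA, if_neg hnp]
        simp only [decS, List.map_cons] at h3 ⊢
        rw [h3]
        norm_num

theorem chain_keepAux : ∀ (l : List Int) (p : Int),
    List.IsChain (· ≤ ·) (p :: l) → keepAux p l = l := by
  intro l
  induction l with
  | nil => intro p _; simp [keepAux]
  | cons y t ih =>
      intro p hc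
      rw [List.isChain_cons_cons] at hc
      simp [keepAux, show ¬ p > y by omega, ih y hc.2]

theorem M_zero_of_chain : ∀ l : List Int, List.IsChain (· ≤ ·) l → (gA l).2 = 0 := by
  intro l
  induction l with
  | nil => intro _; simp [gA]
  | cons v t ih =>
      intro hc
      have ht := ih (List.IsChain.of_cons hc)
      show (stepA v (gA t)).2 = 0
      cases t with
      | nil => simp [gA, stepA, popA]
      | cons y t' =>
          have hvy : v ≤ y := (List.isChain_cons_cons.mp hc).1
          obtain ⟨c, s', h1⟩ : ∃ c s', (stepA y (gA t')).1 = (y, c) :: s' := ⟨_, _, rfl⟩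
          show max (gA (y :: t')).2 (popA v (gA (y :: t')).1 0).2 = 0
          rw [show (gA (y :: t')).1 = (stepA y (gA t')).1 from rfl, h1]
          simp only [popA, if_neg (by omega : ¬ y < v)]
          rw [ht]
          simp

theorem M_pos_of_not_chain : ∀ l : List Int, ¬ List.IsChain (· ≤ ·) l → 1 ≤ (gA l).2 := by
  intro l
  induction l with
  | nil => intro hc; exact absurd List.IsChain.nil hc
  | cons v t ih =>
      intro hc
      by_cases hct : List.IsChain (· ≤ ·) t
      · -- the violation is at the head: t = y :: t' with y < v
        cases t with
        | nil => exact absurd (List.IsChain.singleton v) hc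
        | cons y t' =>
            have hyv : y < v := by
              by_contra hle
              exact hc (List.isChain_cons_cons.mpr ⟨by omega, hct⟩)
            obtain ⟨c, s', h1⟩ : ∃ c s', (stepA y (gA t')).1 = (y, c) :: s' := ⟨_, _, rfl⟩
            show 1 ≤ max (gA (y :: t')).2 (popA v (gA (y :: t')).1 0).2
            rw [show (gA (y :: t')).1 = (stepA y (gA t')).1 from rfl, h1]
            simp only [popA, if_pos hyv]
            have h2 : max (0 + 1) c ≤ (popA v s' (max (0 + 1) c)).2 := by
              rw [popA_eq]
              exact fm_ge_start _ _
            omega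
      · have := ih hct
        show 1 ≤ max (gA t).2 (popA v (gA t).1 0).2
        omega

theorem len_keepAux_le : ∀ (l : List Int) (p : Int), (keepAux p l).length ≤ l.length := by
  intro l
  induction l with
  | nil => intro p; simp [keepAux]
  | cons y t ih =>
      intro p
      by_cases h : p > y
      · simp [keepAux, h]
        have := ih y
        omega
      · simp [keepAux, h]
        exact ih y

theorem len_keepAux_lt : ∀ (l : List Int) (p : Int), ¬ List.IsChain (· ≤ ·) (p :: l) →
    (keepAux p l).length < l.length := by
  intro l
  induction l with
  | nil => intro p hc; exact absurd (List.IsChain.singleton p) hc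
  | cons y t ih =>
      intro p hc
      by_cases h : p > y
      · simp [keepAux, h]
        have := len_keepAux_le t y
        omega
      · have hnc : ¬ List.IsChain (· ≤ ·) (y :: t) := by
          intro hcy
          exact hc (List.isChain_cons_cons.mpr ⟨by omega, hcy⟩)
        simp [keepAux, h]
        exact ih y hnc

theorem simB_eq : ∀ (n : Nat) (l : List Int) (s : Int), l.length ≤ n →
    simB l s = s + (gA l).2 := by
  intro n
  induction n with
  | zero =>
      intro l s hl
      have : l = [] := List.eq_nil_of_length_eq_zero (by omega)
      subst this
      rw [simB]
      simp [roundB, gA]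
  | succ n ih =>
      intro l s hl
      by_cases hch : List.IsChain (· ≤ ·) l
      · have hr : roundB l = l := by
          rw [roundB_eq_roundK]
          cases l with
          | nil => rfl
          | cons x rest => simp [roundK, chain_keepAux rest x hch]
        rw [simB, if_pos (by rw [hr]), M_zero_of_chain l hch]
        omega
      · obtain ⟨x, rest, rfl⟩ : ∃ x rest, l = x :: rest := by
          cases l with
          | nil => exact absurd List.IsChain.nil hch
          | cons x rest => exact ⟨x, rest, rfl⟩
        have hrk : roundB (x :: rest) = x :: keepAux x rest := by
          rw [roundB_eq_roundK]; rfl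
        have hlt : (roundB (x :: rest)).length < (x :: rest).length := by
          rw [hrk]
          have := len_keepAux_lt rest x hch
          simp
          omega
        rw [simB, if_neg (by omega)]
        rw [ih (roundB (x :: rest)) (s + 1) (by simp only [List.length_cons] at hl hlt; omega)]
        have hM : (gA (roundB (x :: rest))).2 = max ((gA (x :: rest)).2 - 1) 0 := by
          rw [hrk, res_eq_smax,
            show (gA (x :: keepAux x rest)).1 = (stepA x (gA (keepAux x rest))).1 from rfl,
            key rest x,
            show (stepA x (gA rest)).1 = (gA (x :: rest)).1 from rfl,
            smax_decS, ← res_eq_smax]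
        have hpos := M_pos_of_not_chain _ hch
        rw [hM]
        omega

theorem totalSteps_eq_gA (nums : List Int) : totalSteps nums = (gA nums).2 := by
  unfold totalSteps
  simp only []
  rw [PySem.List.pyRange_neg_one_eq_reverse]
  rw [show ((-1 : Int) + 1) = 0 from by norm_num,
    show ((nums.length : Int) - 1 + 1) = (nums.length : Int) from by ring]
  rw [List.foldl_reverse]
  unfold gA
  conv_rhs => rw [← PySem.List.map_pyGetD_pyRange_zero' nums 0, List.foldr_map]
  rfl

-- ===== VERDICT (by name: the statement is the Claim_ definition above) =====
theorem totalSteps_spec : Claim_equal_totalSteps := by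
  intro nums _
  unfold Spec_totalSteps totalSteps_alt
  rw [totalSteps_eq_gA, simB_eq nums.length nums 0 le_rfl]
  omega
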